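-- pv_equiv track=rewrite | github.com/wzygxr/shuati | class118_String_Hashing/Code10_CrazySearch.py | count_unique_substrings_with_double_hash
-- ===== SOURCE A (Python) =====
-- def count_unique_substrings_with_double_hash(s, n, nc):
--     """
--     优化版本：使用双哈希策略减少哈希冲突
--     双哈希的基本思想是同时使用两个不同的哈希函数，只有当两个哈希值都相同时才认为子串相同
--
--     双哈希原理：
--     - 使用两个不同的哈希基数和模数
--     - 为每个子串生成两个哈希值，并将它们的元组作为唯一标识
--     - 只有当两个哈希值都相同时，才认为子串相同
--     - 这种方法可以极大降低哈希冲突的概率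
--
--     Python实现优势：
--     - Python中的元组可以直接作为集合的元素，无需额外处理
--     - 整数的无限精度使得哈希计算更加简单
--
--     @param s: 输入字符串
--     @param n: 子串长度
--     @param nc: 字符种类数
--     @return: 不同子串的数量
--
--     时间复杂度：O(M)，其中M是字符串长度
--     空间复杂度：O(M)，用于存储双哈希值元组集合和字符映射
--     """
--     len_s = len(s)
--
--     # 边界条件检查
--     if n > len_s or n <= 0:
--         return 0
--
--     # 创建字符映射
--     char_map = {}
--     char_count = 0
--     for char in s:
--         if char not in char_map:
--             char_count += 1
--             char_map[char] = char_count
--             if char_count > nc: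
--                 return 0
--
--     # 使用两个不同的哈希基数和模数
--     base1, base2 = 499, 911
--     mod1, mod2 = 10**9 + 7, 10**9 + 9
--
--     # 预计算两个哈希基数的n-1次方
--     pow_base1 = 1
--     pow_base2 = 1
--     for i in range(n - 1):
--         pow_base1 = (pow_base1 * base1) % mod1
--         pow_base2 = (pow_base2 * base2) % mod2
--
--     # 计算第一个子串的双哈希值
--     hash1, hash2 = 0, 0
--     for i in range(n):
--         hash1 = (hash1 * base1 + char_map[s[i]]) % mod1
--         hash2 = (hash2 * base2 + char_map[s[i]]) % mod2
--
--     # 使用集合存储双哈希值的元组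
--     hash_set = set()
--     hash_set.add((hash1, hash2))
--
--     # 滚动计算其他子串的双哈希值
--     for i in range(n, len_s):
--         # 计算第一个哈希值
--         hash1 = ((hash1 - char_map[s[i-n]] * pow_base1 % mod1 + mod1) % mod1 * base1 % mod1 + char_map[s[i]]) % mod1
--
--         # 计算第二个哈希值
--         hash2 = ((hash2 - char_map[s[i-n]] * pow_base2 % mod2 + mod2) % mod2 * base2 % mod2 + char_map[s[i]]) % mod2
--
--         # 添加双哈希值的元组
--         hash_set.add((hash1, hash2))
--
--     return len(hash_set)
-- ===== SOURCE B (Python) =====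
-- def count_unique_substrings_with_double_hash(s, n, nc):
--     """Same count as the rolling-hash version, but each window's double hash is
--     recomputed from scratch (no pow precomputation, no rolling update)."""
--     len_s = len(s)
--     if n > len_s or n <= 0:
--         return 0
--     char_map = {}
--     char_count = 0
--     for char in s:
--         if char not in char_map:
--             char_count += 1
--             char_map[char] = char_count
--             if char_count > nc:
--                 return 0
--     base1, base2 = 499, 911
--     mod1, mod2 = 10**9 + 7, 10**9 + 9
--     hash_set = set()
--     for i in range(len_s - n + 1):
--         hash1, hash2 = 0, 0
--         for j in range(n):
--             code = char_map[s[i + j]]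
--             hash1 = (hash1 * base1 + code) % mod1
--             hash2 = (hash2 * base2 + code) % mod2
--         hash_set.add((hash1, hash2))
--     return len(hash_set)
-- ===== Notes on version B (the rewrite author's own statement) =====
-- stated objective: simpler
-- what changed: Dropped the rolling-hash machinery (pow-of-base precomputation and the subtract/multiply/re-add update): B recomputes each window's two polynomial hashes from scratch with the same bases, moduli and first-appearance char codes, so the stored (hash1, hash2) tuples are bit-identical.
import Mathlib
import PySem

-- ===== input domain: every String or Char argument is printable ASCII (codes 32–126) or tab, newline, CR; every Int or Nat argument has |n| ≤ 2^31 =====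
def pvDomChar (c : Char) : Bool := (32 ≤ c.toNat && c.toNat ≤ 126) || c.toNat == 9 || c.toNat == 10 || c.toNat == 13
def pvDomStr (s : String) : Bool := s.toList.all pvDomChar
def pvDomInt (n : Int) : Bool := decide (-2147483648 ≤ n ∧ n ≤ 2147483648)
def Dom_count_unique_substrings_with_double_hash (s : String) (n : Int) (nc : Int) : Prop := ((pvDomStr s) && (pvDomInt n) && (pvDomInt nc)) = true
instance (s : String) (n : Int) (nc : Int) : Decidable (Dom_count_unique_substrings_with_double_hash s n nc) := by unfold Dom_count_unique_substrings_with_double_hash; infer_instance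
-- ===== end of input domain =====

-- B replaces A's rolling-hash update (pow precomputation + subtract/multiply step) by a
-- per-window from-scratch recomputation of the same two polynomial hashes: simpler, same count.

-- ===== PORT A =====
-- the char_map construction (this loop is textually identical in A and B; 'none' = the mid-loop 'return 0')
def pvBuildCharMap (nc : Int) : List Char → PySem.Dict Char Int → Int → Option (PySem.Dict Char Int)
  | [], cm, _ => some cm
  | c :: rest, cm, cnt =>
    if cm.contains c then pvBuildCharMap nc rest cm cnt
    else
      let cnt' := cnt + 1
      let cm' := cm.insert c cnt'
      if cnt' > nc then none else pvBuildCharMap nc rest cm' cnt'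

-- char_map[s[i]] (the key is always present; getD's default is never read)
def pvCode (cm : PySem.Dict Char Int) (cs : List Char) (i : Int) : Int :=
  cm.getD (PySem.List.pyGetD cs i ' ') 0

def count_unique_substrings_with_double_hash (s : String) (n : Int) (nc : Int) : Int :=
  let cs := s.toList
  let len_s : Int := PySem.Str.len s
  if n > len_s ∨ n ≤ 0 then 0
  else
    match pvBuildCharMap nc cs PySem.Dict.empty 0 with
    | none => 0
    | some cm =>
      -- pow_base1/pow_base2 precomputation
      let pw := (PySem.List.pyRange 0 (n - 1) 1).foldl
        (fun (p : Int × Int) _ =>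
          (PySem.Int.mod (p.1 * 499) 1000000007, PySem.Int.mod (p.2 * 911) 1000000009)) (1, 1)
      -- first window's double hash (char_map[s[i]] is always present: total getD, default 0)
      let h0 := (PySem.List.pyRange 0 n 1).foldl
        (fun (h : Int × Int) i =>
          (PySem.Int.mod (h.1 * 499 + pvCode cm cs i) 1000000007,
           PySem.Int.mod (h.2 * 911 + pvCode cm cs i) 1000000009)) (0, 0)
      -- rolling loop, state = (hash_set, hash1, hash2)
      let st := (PySem.List.pyRange n len_s 1).foldl
        (fun (st : PySem.Set (Int × Int) × Int × Int) i =>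
          let h1 := PySem.Int.mod (PySem.Int.mod (PySem.Int.mod (st.2.1 - PySem.Int.mod (pvCode cm cs (i - n) * pw.1) 1000000007 + 1000000007) 1000000007 * 499) 1000000007 + pvCode cm cs i) 1000000007
          let h2 := PySem.Int.mod (PySem.Int.mod (PySem.Int.mod (st.2.2 - PySem.Int.mod (pvCode cm cs (i - n) * pw.2) 1000000009 + 1000000009) 1000000009 * 911) 1000000009 + pvCode cm cs i) 1000000009
          (st.1.add (h1, h2), h1, h2))
        (PySem.Set.add PySem.Set.empty (h0.1, h0.2), h0.1, h0.2)
      (PySem.Set.len st.1 : Int)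

-- ===== PORT B =====
def count_unique_substrings_with_double_hash_alt (s : String) (n : Int) (nc : Int) : Int :=
  let cs := s.toList
  let len_s : Int := PySem.Str.len s
  if n > len_s ∨ n ≤ 0 then 0
  else
    match pvBuildCharMap nc cs PySem.Dict.empty 0 with
    | none => 0
    | some cm =>
      let hset := (PySem.List.pyRange 0 (len_s - n + 1) 1).foldl
        (fun (hs : PySem.Set (Int × Int)) i =>
          let h := (PySem.List.pyRange 0 n 1).foldl
            (fun (h : Int × Int) j =>
              (PySem.Int.mod (h.1 * 499 + pvCode cm cs (i + j)) 1000000007,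
               PySem.Int.mod (h.2 * 911 + pvCode cm cs (i + j)) 1000000009)) (0, 0)
          hs.add h) PySem.Set.empty
      (PySem.Set.len hset : Int)

-- ===== PRECONDITION & SPEC =====
def Spec_count_unique_substrings_with_double_hash (s : String) (n : Int) (nc : Int) (out : Int) : Prop := out = count_unique_substrings_with_double_hash_alt s n nc
instance (s : String) (n : Int) (nc : Int) (out : Int) : Decidable (Spec_count_unique_substrings_with_double_hash s n nc out) := by unfold Spec_count_unique_substrings_with_double_hash; infer_instance

-- ===== CLAIM (what is proved, stated in full; the proofs are below) =====
def Claim_equal_count_unique_substrings_with_double_hash : Prop := ∀ (s : String) (n : Int) (nc : Int), Dom_count_unique_substrings_with_double_hash s n nc → Spec_count_unique_substrings_with_double_hash s n nc (count_unique_substrings_with_double_hash s n nc)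

-- ===== LEMMAS AND PROOFS =====


def pvHm (m b : Int) (l : List Int) (h : Int) : Int := l.foldl (fun h c => (h * b + c) % m) h
def pvHp (b : Int) (l : List Int) (h : Int) : Int := l.foldl (fun h c => h * b + c) h

theorem pvModEq_emod (m a : Int) : a % m ≡ a [ZMOD m] := Int.emod_emod_of_dvd a dvd_rfl

theorem pvHm_modeq (m b : Int) (l : List Int) (h h' : Int) (hh : h ≡ h' [ZMOD m]) :
    pvHm m b l h ≡ pvHp b l h' [ZMOD m] := by
  induction l generalizing h h' with
  | nil => exact hh
  | cons c rest ih =>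
    exact ih _ _ ((pvModEq_emod m _).trans ((hh.mul_right b).add_right c))

theorem pvHm_reduced (m b : Int) (l : List Int) (h : Int) (hh : h % m = h) :
    pvHm m b l h % m = pvHm m b l h := by
  induction l generalizing h with
  | nil => exact hh
  | cons c rest ih => exact ih _ (Int.emod_emod_of_dvd _ dvd_rfl)

theorem pvHp_shift (b : Int) (l : List Int) (h : Int) :
    pvHp b l h = h * b ^ l.length + pvHp b l 0 := by
  induction l generalizing h with
  | nil => simp [pvHp]
  | cons c rest ih =>
    show pvHp b rest (h * b + c) = h * b ^ (rest.length + 1) + pvHp b rest (0 * b + c)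
    rw [ih (h * b + c), ih (0 * b + c)]
    ring

theorem pvHp_append (b : Int) (l : List Int) (z h : Int) :
    pvHp b (l ++ [z]) h = pvHp b l h * b + z := by
  simp [pvHp]

theorem pvPow_modeq (m b : Int) (l : List Int) (p : Int) :
    l.foldl (fun p _ => (p * b) % m) p ≡ p * b ^ l.length [ZMOD m] := by
  induction l generalizing p with
  | nil => simp
  | cons c rest ih =>
    simp only [List.foldl_cons, List.length_cons]
    refine (ih _).trans ?_
    calc (p * b) % m * b ^ rest.length ≡ p * b * b ^ rest.length [ZMOD m] :=
          (pvModEq_emod m _).mul_right _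
      _ = p * b ^ (rest.length + 1) := by ring

theorem pvRoll (m b : Int) (x z pw h : Int) (ys : List Int)
    (hh : h = pvHm m b (x :: ys) 0)
    (hpw : pw ≡ b ^ ys.length [ZMOD m]) :
    ((h - x * pw % m + m) % m * b % m + z) % m = pvHm m b (ys ++ [z]) 0 := by
  have hred : pvHm m b (ys ++ [z]) 0 % m = pvHm m b (ys ++ [z]) 0 :=
    pvHm_reduced m b _ 0 (Int.zero_emod m)
  have h1 : h ≡ x * b ^ ys.length + pvHp b ys 0 [ZMOD m] := by
    rw [hh]
    have h0 := pvHm_modeq m b (x :: ys) 0 0 (Int.ModEq.refl 0)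
    have he : pvHp b (x :: ys) 0 = x * b ^ ys.length + pvHp b ys 0 := by
      show pvHp b ys (0 * b + x) = _
      rw [pvHp_shift b ys (0 * b + x)]; ring
    rwa [he] at h0
  have h2 : x * pw % m ≡ x * b ^ ys.length [ZMOD m] :=
    (pvModEq_emod m _).trans (hpw.mul_left x)
  have h3 : h - x * pw % m + m ≡ pvHp b ys 0 [ZMOD m] := by
    calc h - x * pw % m + m
        ≡ (x * b ^ ys.length + pvHp b ys 0) - x * b ^ ys.length + m [ZMOD m] := (h1.sub h2).add_right m
      _ = pvHp b ys 0 + m := by ring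
      _ ≡ pvHp b ys 0 + 0 [ZMOD m] := (Int.ModEq.refl _).add (Int.modEq_zero_iff_dvd.mpr dvd_rfl)
      _ = pvHp b ys 0 := by ring
  have hcong : (h - x * pw % m + m) % m * b % m + z ≡ pvHp b (ys ++ [z]) 0 [ZMOD m] := by
    calc (h - x * pw % m + m) % m * b % m + z
        ≡ pvHp b ys 0 * b + z [ZMOD m] :=
          (((pvModEq_emod m _).trans (((pvModEq_emod m _).trans h3).mul_right b)).add_right z)
      _ = pvHp b (ys ++ [z]) 0 := (pvHp_append b ys z 0).symm
  have hcong2 : pvHm m b (ys ++ [z]) 0 ≡ pvHp b (ys ++ [z]) 0 [ZMOD m] :=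
    pvHm_modeq m b _ 0 0 (Int.ModEq.refl 0)
  calc ((h - x * pw % m + m) % m * b % m + z) % m
      = pvHm m b (ys ++ [z]) 0 % m := hcong.trans hcong2.symm
    _ = pvHm m b (ys ++ [z]) 0 := hred
def pvWin (F : Int → Int) (N : Nat) (i : Int) : List Int :=
  (PySem.List.pyRange 0 (N : Int) 1).map (fun j => F (i + j))

theorem pvWin_cons (F : Int → Int) (M : Nat) (i : Int) :
    pvWin F (M + 1) i = F i :: pvWin F M (i + 1) := by
  simp only [pvWin, PySem.List.pyRange_one, List.map_map]
  have h1 : ((M : Int) + 1 - 0).toNat = M + 1 := by omega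
  have h2 : ((M : Int) - 0).toNat = M := by omega
  rw [show ((M + 1 : Nat) : Int) = (M : Int) + 1 by push_cast; ring, h1, h2,
    List.range_succ_eq_map, List.map_cons, List.map_map]
  congr 1
  · norm_num
  · apply List.map_congr_left
    intro k _
    simp only [Function.comp_apply]
    congr 1
    push_cast
    ring

theorem pvWin_snoc (F : Int → Int) (M : Nat) (i : Int) :
    pvWin F (M + 1) i = pvWin F M i ++ [F (i + M)] := by
  simp only [pvWin]
  rw [show ((M + 1 : Nat) : Int) = (M : Int) + 1 by push_cast; ring,
    PySem.List.pyRange_one_succ_right (by positivity), List.map_append]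
  simp

theorem pvWin_length (F : Int → Int) (N : Nat) (i : Int) : (pvWin F N i).length = N := by
  simp [pvWin, PySem.List.length_pyRange_one]

theorem pvInnerFold (m b : Int) (F : Int → Int) (N : Nat) (i : Int) :
    (PySem.List.pyRange 0 (N : Int) 1).foldl (fun h j => (h * b + F (i + j)) % m) 0 =
    pvHm m b (pvWin F N i) 0 := by
  simp only [pvHm, pvWin, List.foldl_map]

def pvPair (F : Int → Int) (N : Nat) (i : Int) : Int × Int :=
  (pvHm 1000000007 499 (pvWin F N i) 0, pvHm 1000000009 911 (pvWin F N i) 0)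

-- the rolling loop of A: after t steps the hash pair is window t's pair and the set has collected windows 1..t
theorem pvALoop (F : Int → Int) (M : Nat) (n : Int) (hn : n = (M : Int) + 1)
    (pw1 pw2 : Int) (hpw1 : pw1 ≡ 499 ^ M [ZMOD 1000000007]) (hpw2 : pw2 ≡ 911 ^ M [ZMOD 1000000009])
    (t : Nat) (S0 : PySem.Set (Int × Int)) :
    (PySem.List.pyRange n (n + t) 1).foldl
      (fun (st : PySem.Set (Int × Int) × Int × Int) i =>
        ((st.1.add
          (((st.2.1 - F (i - n) * pw1 % 1000000007 + 1000000007) % 1000000007 * 499 % 1000000007 + F i) % 1000000007,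
           ((st.2.2 - F (i - n) * pw2 % 1000000009 + 1000000009) % 1000000009 * 911 % 1000000009 + F i) % 1000000009)),
         ((st.2.1 - F (i - n) * pw1 % 1000000007 + 1000000007) % 1000000007 * 499 % 1000000007 + F i) % 1000000007,
         ((st.2.2 - F (i - n) * pw2 % 1000000009 + 1000000009) % 1000000009 * 911 % 1000000009 + F i) % 1000000009))
      (S0, (pvPair F (M + 1) 0).1, (pvPair F (M + 1) 0).2) =
    ((List.range t).foldl (fun S k => S.add (pvPair F (M + 1) ((k : Int) + 1))) S0,
     (pvPair F (M + 1) (t : Int)).1, (pvPair F (M + 1) (t : Int)).2) := by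
  induction t with
  | zero => rw [show n + (0 : Nat) = n by push_cast; ring, PySem.List.pyRange_one_eq_nil le_rfl]; rfl
  | succ t ih =>
    rw [show n + ((t + 1 : Nat) : Int) = (n + t) + 1 by push_cast; ring,
      PySem.List.pyRange_one_succ_right (by omega), List.foldl_append, ih, List.foldl_cons, List.foldl_nil]
    have harg : n + (t : Int) - n = (t : Int) := by ring
    have hx : (pvPair F (M + 1) (t : Int)).1 = pvHm 1000000007 499 (F (t : Int) :: pvWin F M ((t : Int) + 1)) 0 := by
      rw [pvPair, ← pvWin_cons]
    have hy : (pvPair F (M + 1) (t : Int)).2 = pvHm 1000000009 911 (F (t : Int) :: pvWin F M ((t : Int) + 1)) 0 := by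
      rw [pvPair, ← pvWin_cons]
    have hws : pvWin F M ((t : Int) + 1) ++ [F (n + (t : Int))] = pvWin F (M + 1) ((t : Int) + 1) := by
      rw [pvWin_snoc]
      have hz : n + (t : Int) = ((t : Int) + 1) + M := by rw [hn]; ring
      rw [hz]
    have e1 : (((pvPair F (M + 1) (t : Int)).1 - F (n + (t : Int) - n) * pw1 % 1000000007 + 1000000007) % 1000000007 * 499 % 1000000007 + F (n + (t : Int))) % 1000000007 = (pvPair F (M + 1) ((t : Int) + 1)).1 := by
      rw [harg]
      have hr := pvRoll 1000000007 499 (F (t : Int)) (F (n + (t : Int))) pw1 _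
        (pvWin F M ((t : Int) + 1)) hx (by rw [pvWin_length]; exact hpw1)
      rw [hr, hws]
      rfl
    have e2 : (((pvPair F (M + 1) (t : Int)).2 - F (n + (t : Int) - n) * pw2 % 1000000009 + 1000000009) % 1000000009 * 911 % 1000000009 + F (n + (t : Int))) % 1000000009 = (pvPair F (M + 1) ((t : Int) + 1)).2 := by
      rw [harg]
      have hr := pvRoll 1000000009 911 (F (t : Int)) (F (n + (t : Int))) pw2 _
        (pvWin F M ((t : Int) + 1)) hy (by rw [pvWin_length]; exact hpw2)
      rw [hr, hws]
      rfl
    dsimp only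
    rw [e1, e2, List.range_succ, List.foldl_append, List.foldl_cons, List.foldl_nil]
    have hc : ((t + 1 : Nat) : Int) = (t : Int) + 1 := by push_cast; ring
    rw [hc]

theorem pvBInner (cm : PySem.Dict Char Int) (cs : List Char) (N : Nat) (i : Int) :
    (PySem.List.pyRange 0 (N : Int) 1).foldl
      (fun (h : Int × Int) j =>
        ((h.1 * 499 + pvCode cm cs (i + j)) % 1000000007,
         (h.2 * 911 + pvCode cm cs (i + j)) % 1000000009)) (0, 0) =
    pvPair (pvCode cm cs) N i := by
  rw [PySem.List.foldl_prod_mk (f := fun a j => (a * 499 + pvCode cm cs (i + j)) % 1000000007)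
    (g := fun a j => (a * 911 + pvCode cm cs (i + j)) % 1000000009)]
  rw [pvInnerFold, pvInnerFold]
  rfl

theorem pvBInner0 (cm : PySem.Dict Char Int) (cs : List Char) (N : Nat) :
    (PySem.List.pyRange 0 (N : Int) 1).foldl
      (fun (h : Int × Int) i =>
        ((h.1 * 499 + pvCode cm cs i) % 1000000007,
         (h.2 * 911 + pvCode cm cs i) % 1000000009)) (0, 0) =
    pvPair (pvCode cm cs) N 0 := by
  rw [← pvBInner cm cs N 0]
  congr 1
  funext h j
  rw [zero_add]

theorem pvBLoop (F : Int → Int) (N : Nat) (K : Nat) (S0 : PySem.Set (Int × Int)) :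
    (PySem.List.pyRange 0 (K : Int) 1).foldl (fun S i => S.add (pvPair F N i)) S0 =
    (List.range K).foldl (fun S k => S.add (pvPair F N (k : Int))) S0 := by
  rw [PySem.List.pyRange_one]
  simp [List.foldl_map]

theorem pvSetsEq (F : Int → Int) (N : Nat) (K : Nat) :
    (List.range (K + 1)).foldl (fun S k => S.add (pvPair F N (k : Int))) PySem.Set.empty =
    (List.range K).foldl (fun S k => S.add (pvPair F N ((k : Int) + 1)))
      (PySem.Set.add PySem.Set.empty ((pvPair F N 0).1, (pvPair F N 0).2)) := by
  rw [List.range_succ_eq_map]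
  simp only [List.foldl_cons, List.foldl_map, Nat.cast_zero, Nat.cast_succ]

-- ===== VERDICT (by name: the statement is the Claim_ definition above) =====
theorem count_unique_substrings_with_double_hash_spec : Claim_equal_count_unique_substrings_with_double_hash := by
  intro s n nc _
  unfold Spec_count_unique_substrings_with_double_hash
  simp only [count_unique_substrings_with_double_hash, count_unique_substrings_with_double_hash_alt]
  by_cases hb : n > PySem.Str.len s ∨ n ≤ 0
  · rw [if_pos hb, if_pos hb]
  · rw [if_neg hb, if_neg hb]
    cases hcm : pvBuildCharMap nc s.toList PySem.Dict.empty 0 with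
    | none => rfl
    | some cm =>
      have hb1 : n ≤ PySem.Str.len s := le_of_not_gt (fun h => hb (Or.inl h))
      have hb2 : 0 < n := lt_of_not_ge (fun h => hb (Or.inr h))
      rw [PySem.Str.len_eq] at hb1
      set M : Nat := (n - 1).toNat with hMdef
      have hn : n = ((M + 1 : Nat) : Int) := by push_cast; omega
      set K : Nat := ((s.toList.length : Int) - n).toNat with hKdef
      have hKe : (s.toList.length : Int) = ((M + 1 : Nat) : Int) + (K : Int) := by push_cast; omega
      simp only [PySem.Int.mod_eq_emod_of_pos (show (0:Int) < 1000000007 by norm_num),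
        PySem.Int.mod_eq_emod_of_pos (show (0:Int) < 1000000009 by norm_num)]
      rw [PySem.Str.len_eq, hn]
      rw [show (s.toList.length : Int) - ((M + 1 : Nat) : Int) + 1 = ((K + 1 : Nat) : Int) by push_cast; omega]
      rw [hKe]
      rw [PySem.List.foldl_prod_mk (f := fun (p : Int) (_ : Int) => (p * 499) % 1000000007)
        (g := fun (p : Int) (_ : Int) => (p * 911) % 1000000009)]
      dsimp only
      rw [pvBInner0 cm s.toList (M + 1)]
      have hpw1 : (PySem.List.pyRange 0 (((M + 1 : Nat) : Int) - 1) 1).foldl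
          (fun (p : Int) (_ : Int) => (p * 499) % 1000000007) 1 ≡ 499 ^ M [ZMOD 1000000007] := by
        have h := pvPow_modeq 1000000007 499 (PySem.List.pyRange 0 (((M + 1 : Nat) : Int) - 1) 1) 1
        rwa [PySem.List.length_pyRange_one, show ((((M + 1 : Nat) : Int)) - 1 - 0).toNat = M by push_cast; omega, one_mul] at h
      have hpw2 : (PySem.List.pyRange 0 (((M + 1 : Nat) : Int) - 1) 1).foldl
          (fun (p : Int) (_ : Int) => (p * 911) % 1000000009) 1 ≡ 911 ^ M [ZMOD 1000000009] := by
        have h := pvPow_modeq 1000000009 911 (PySem.List.pyRange 0 (((M + 1 : Nat) : Int) - 1) 1) 1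
        rwa [PySem.List.length_pyRange_one, show ((((M + 1 : Nat) : Int)) - 1 - 0).toNat = M by push_cast; omega, one_mul] at h
      rw [pvALoop (pvCode cm s.toList) M ((M + 1 : Nat) : Int) (by push_cast; ring) _ _ hpw1 hpw2 K]
      simp only [pvBInner]
      rw [pvBLoop (pvCode cm s.toList) (M + 1) (K + 1) PySem.Set.empty]
      rw [pvSetsEq]
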